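-- pv_equiv track=rewrite | github.com/aman1678/Surviving-Stabilizer-Group-Calculator-in-FBQC | support.py | anticommutes
-- ===== SOURCE A (Python) =====
-- def anticommutes(P: str, Q: str) -> bool:
--     """Return True iff Pauli strings P and Q anticommute."""
--
--     assert len(P) == len(Q), "Mismatched length"
--
--     anti_pairs = {('X','Y'),('Y','X'),('X','Z'),('Z','X'),('Y','Z'),('Z','Y')}
--     parity = 0
--
--     for a,b in zip(P,Q):
--         if a != 'I' and b != 'I' and a != b and (a,b) in anti_pairs:
--             parity ^= 1
--     return parity == 1
-- ===== SOURCE B (Python) =====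
-- def anticommutes(P: str, Q: str) -> bool:
--     """Return True iff Pauli strings P and Q anticommute."""
--
--     assert len(P) == len(Q), "Mismatched length"
--
--     # Encode each string as two big-integer bitmasks (symplectic x/z vectors),
--     # then take the parity of the popcount of the symplectic inner product.
--     xP = zP = 0
--     for c in P:
--         xP = (xP << 1) | (c in 'XY')
--         zP = (zP << 1) | (c in 'YZ')
--     xQ = zQ = 0
--     for c in Q:
--         xQ = (xQ << 1) | (c in 'XY')
--         zQ = (zQ << 1) | (c in 'YZ')
--     return bin((xP & zQ) ^ (zP & xQ)).count('1') % 2 == 1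
-- ===== Notes on version B (the rewrite author's own statement) =====
-- stated objective: alternative
-- what changed: Instead of testing each position against an anticommuting-pair set in one zip pass, B first encodes each string into big-integer symplectic x/z bitmasks in staged per-string passes and then returns the parity of the popcount of the whole-word symplectic inner product (xP&zQ)^(zP&xQ).
import Mathlib
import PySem

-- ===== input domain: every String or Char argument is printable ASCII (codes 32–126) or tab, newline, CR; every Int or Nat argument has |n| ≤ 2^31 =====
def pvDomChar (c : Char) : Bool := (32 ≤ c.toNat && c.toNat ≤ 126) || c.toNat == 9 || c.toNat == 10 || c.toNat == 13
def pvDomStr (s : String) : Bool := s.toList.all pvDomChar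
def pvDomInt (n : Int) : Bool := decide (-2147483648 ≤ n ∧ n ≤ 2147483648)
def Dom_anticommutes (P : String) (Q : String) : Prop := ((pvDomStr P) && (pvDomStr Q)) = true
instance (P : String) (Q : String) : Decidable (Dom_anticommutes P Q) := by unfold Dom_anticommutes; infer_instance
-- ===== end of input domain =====

-- B replaces the per-position anticommuting-pair set lookup with staged passes that encode each
-- string into big-integer symplectic x/z bitmasks and take the popcount parity of the whole-word
-- symplectic inner product (a genuinely different, bitset-based algorithm of the same O(n) cost).

-- ===== PORT A =====
def antiPairsA : List (Char × Char) :=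
  PySem.Set.ofList [('X','Y'),('Y','X'),('X','Z'),('Z','X'),('Y','Z'),('Z','Y')]

def anticommutes (P : String) (Q : String) : Bool :=
  let parity : Nat :=
    (P.toList.zip Q.toList).foldl
      (fun parity ab =>
        if ab.1 ≠ 'I' ∧ ab.2 ≠ 'I' ∧ ab.1 ≠ ab.2 ∧ ab ∈ antiPairsA then parity ^^^ 1
        else parity) 0
  parity == 1

-- ===== PORT B =====
-- Python `c in 'XY'` / `c in 'YZ'` as 0/1 bits
def bitXY (c : Char) : Nat := (decide (c = 'X' ∨ c = 'Y')).toNat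
def bitYZ (c : Char) : Nat := (decide (c = 'Y' ∨ c = 'Z')).toNat

-- port of `bin(n).count('1')` (number of 1-bits of a nonnegative int)
def popcount : Nat → Nat
  | 0 => 0
  | n+1 => (n+1) % 2 + popcount ((n+1)/2)

def anticommutes_alt (P : String) (Q : String) : Bool :=
  let mP := P.toList.foldl
    (fun (xz : Nat × Nat) c => (xz.1 <<< 1 ||| bitXY c, xz.2 <<< 1 ||| bitYZ c)) (0, 0)
  let mQ := Q.toList.foldl
    (fun (xz : Nat × Nat) c => (xz.1 <<< 1 ||| bitXY c, xz.2 <<< 1 ||| bitYZ c)) (0, 0)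
  popcount ((mP.1 &&& mQ.2) ^^^ (mP.2 &&& mQ.1)) % 2 == 1

-- ===== PRECONDITION & SPEC =====
-- A asserts len(P) == len(Q) (AssertionError otherwise); Pre_ admits exactly the equal-length inputs.
def Pre_anticommutes (P : String) (Q : String) : Prop := P.toList.length = Q.toList.length
instance (P : String) (Q : String) : Decidable (Pre_anticommutes P Q) := by
  unfold Pre_anticommutes; infer_instance
def pvWitness_anticommutes : String × String := ("XY", "YX")

def Spec_anticommutes (P : String) (Q : String) (out : Bool) : Prop := out = anticommutes_alt P Q
instance (P : String) (Q : String) (out : Bool) : Decidable (Spec_anticommutes P Q out) := by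
  unfold Spec_anticommutes; infer_instance

-- ===== CLAIM (what is proved, stated in full; the proofs are below) =====
def Claim_equal_anticommutes : Prop := ∀ (P : String) (Q : String), Dom_anticommutes P Q → Pre_anticommutes P Q → Spec_anticommutes P Q (anticommutes P Q)

-- ===== LEMMAS AND PROOFS =====

-- single-bit helpers
theorem bitXY_lt (c : Char) : bitXY c < 2 := by
  unfold bitXY; cases (decide (c = 'X' ∨ c = 'Y')) <;> simp
theorem bitYZ_lt (c : Char) : bitYZ c < 2 := by
  unfold bitYZ; cases (decide (c = 'Y' ∨ c = 'Z')) <;> simp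

-- bit-block arithmetic on 2*a + u with u < 2
theorem or_bit (a u : Nat) (hu : u < 2) : 2 * a ||| u = 2 * a + u := by
  apply Nat.eq_of_testBit_eq
  intro i
  rw [Nat.testBit_or]
  cases i with
  | zero =>
    simp only [Nat.testBit_zero]
    have h1 : (2 * a) % 2 = 0 := by omega
    have h2 : (2 * a + u) % 2 = u := by omega
    interval_cases u <;> simp [h1, h2]
  | succ i =>
    have h1 : (2 * a) / 2 = a := by omega
    have h2 : (2 * a + u) / 2 = a := by omega
    have h3 : u / 2 = 0 := by omega
    simp only [Nat.testBit_add_one, h1, h2, h3]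
    simp

theorem and_bit (a b u v : Nat) (hu : u < 2) (hv : v < 2) :
    (2 * a + u) &&& (2 * b + v) = 2 * (a &&& b) + (u &&& v) := by
  have huv : u &&& v < 2 := lt_of_le_of_lt (Nat.and_le_left) hu
  apply Nat.eq_of_testBit_eq
  intro i
  rw [Nat.testBit_and]
  cases i with
  | zero =>
    simp only [Nat.testBit_zero]
    have h1 : (2 * a + u) % 2 = u := by omega
    have h2 : (2 * b + v) % 2 = v := by omega
    have h3 : (2 * (a &&& b) + (u &&& v)) % 2 = u &&& v := by omega
    rw [h1, h2, h3]
    interval_cases u <;> interval_cases v <;> simp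
  | succ i =>
    have h1 : (2 * a + u) / 2 = a := by omega
    have h2 : (2 * b + v) / 2 = b := by omega
    have h3 : (2 * (a &&& b) + (u &&& v)) / 2 = a &&& b := by omega
    simp only [Nat.testBit_add_one, h1, h2, h3]
    simp [Nat.testBit_and]

theorem xor_bit (a b u v : Nat) (hu : u < 2) (hv : v < 2) :
    (2 * a + u) ^^^ (2 * b + v) = 2 * (a ^^^ b) + (u ^^^ v) := by
  have huv : u ^^^ v < 2 := by
    interval_cases u <;> interval_cases v <;> decide
  apply Nat.eq_of_testBit_eq
  intro i
  rw [Nat.testBit_xor]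
  cases i with
  | zero =>
    simp only [Nat.testBit_zero]
    have h1 : (2 * a + u) % 2 = u := by omega
    have h2 : (2 * b + v) % 2 = v := by omega
    have h3 : (2 * (a ^^^ b) + (u ^^^ v)) % 2 = u ^^^ v := by omega
    rw [h1, h2, h3]
    interval_cases u <;> interval_cases v <;> simp
  | succ i =>
    have h1 : (2 * a + u) / 2 = a := by omega
    have h2 : (2 * b + v) / 2 = b := by omega
    have h3 : (2 * (a ^^^ b) + (u ^^^ v)) / 2 = a ^^^ b := by omega
    simp only [Nat.testBit_add_one, h1, h2, h3]
    simp [Nat.testBit_xor]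

theorem popcount_eq (n : Nat) :
    popcount n = if n = 0 then 0 else n % 2 + popcount (n / 2) := by
  cases n with
  | zero => simp [popcount]
  | succ m => simp [popcount]

theorem popcount_bit (m u : Nat) (hu : u < 2) : popcount (2 * m + u) = u + popcount m := by
  rw [popcount_eq]
  by_cases h : 2 * m + u = 0
  · have hm : m = 0 := by omega
    have hu0 : u = 0 := by omega
    simp [h, hm, hu0, popcount]
  · have h1 : (2 * m + u) % 2 = u := by omega
    have h2 : (2 * m + u) / 2 = m := by omega
    rw [if_neg h, h1, h2]

theorem mod_two_xor (p w : Nat) (hw : w < 2) : (w + p) % 2 = (p % 2) ^^^ w := by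
  have hp := Nat.mod_two_eq_zero_or_one p
  interval_cases w <;> rcases hp with hp | hp <;> simp [Nat.add_mod, hp]

-- the per-position symplectic bit
def tbit (a b : Char) : Nat := (bitXY a &&& bitYZ b) ^^^ (bitYZ a &&& bitXY b)

theorem tbit_lt (a b : Char) : tbit a b < 2 := by
  unfold tbit
  have h1 : bitXY a &&& bitYZ b < 2 := lt_of_le_of_lt Nat.and_le_left (bitXY_lt a)
  have h2 : bitYZ a &&& bitXY b < 2 := lt_of_le_of_lt Nat.and_le_left (bitYZ_lt a)
  interval_cases h : (bitXY a &&& bitYZ b) <;> interval_cases h2 : (bitYZ a &&& bitXY b) <;> simp_all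

-- A's branch condition computes exactly the symplectic bit
theorem cond_eq_tbit (a b : Char) :
    (if a ≠ 'I' ∧ b ≠ 'I' ∧ a ≠ b ∧ (a, b) ∈ antiPairsA then (1 : Nat) else 0) = tbit a b := by
  by_cases h1 : a = 'X' <;> by_cases h2 : a = 'Y' <;> by_cases h3 : a = 'Z' <;>
  by_cases g1 : b = 'X' <;> by_cases g2 : b = 'Y' <;> by_cases g3 : b = 'Z' <;>
    simp_all [antiPairsA, PySem.Set.mem_ofList, Prod.ext_iff, tbit, bitXY, bitYZ]

-- pulling the start value out of an XOR fold
theorem foldl_xor_start (l : List (Char × Char)) (p : Nat) :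
    l.foldl (fun q ab => q ^^^ tbit ab.1 ab.2) p
      = p ^^^ l.foldl (fun q ab => q ^^^ tbit ab.1 ab.2) 0 := by
  induction l generalizing p with
  | nil => simp
  | cons ab l ih =>
    simp only [List.foldl_cons]
    rw [ih (p ^^^ tbit ab.1 ab.2), ih (0 ^^^ tbit ab.1 ab.2)]
    simp [Nat.xor_assoc]

-- A's fold is the XOR fold of the symplectic bits
theorem foldA_eq_xor (l : List (Char × Char)) (p : Nat) :
    l.foldl (fun parity ab =>
        if ab.1 ≠ 'I' ∧ ab.2 ≠ 'I' ∧ ab.1 ≠ ab.2 ∧ ab ∈ antiPairsA then parity ^^^ 1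
        else parity) p
      = l.foldl (fun q ab => q ^^^ tbit ab.1 ab.2) p := by
  induction l generalizing p with
  | nil => rfl
  | cons ab l ih =>
    simp only [List.foldl_cons]
    rw [← ih]
    congr 1
    rw [← cond_eq_tbit ab.1 ab.2]
    split_ifs <;> simp

-- scalar mask-building folds
def gx (l : List Char) (x : Nat) : Nat := l.foldl (fun x c => 2 * x + bitXY c) x
def gz (l : List Char) (z : Nat) : Nat := l.foldl (fun z c => 2 * z + bitYZ c) z

-- B's pair fold splits into the two scalar folds
theorem pair_fold_eq (l : List Char) (x z : Nat) :
    l.foldl (fun (xz : Nat × Nat) c => (xz.1 <<< 1 ||| bitXY c, xz.2 <<< 1 ||| bitYZ c)) (x, z)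
      = (gx l x, gz l z) := by
  induction l generalizing x z with
  | nil => rfl
  | cons c l ih =>
    simp only [List.foldl_cons]
    rw [show x <<< 1 = 2 * x by rw [Nat.shiftLeft_succ, Nat.shiftLeft_zero],
        show z <<< 1 = 2 * z by rw [Nat.shiftLeft_succ, Nat.shiftLeft_zero],
        or_bit x (bitXY c) (bitXY_lt c), or_bit z (bitYZ c) (bitYZ_lt c), ih]
    rfl

-- main invariant: the popcount parity of the masked inner product, with arbitrary accumulators
theorem main_inv (L1 L2 : List Char) (h : L1.length = L2.length) (x1 z1 x2 z2 : Nat) :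
    popcount ((gx L1 x1 &&& gz L2 z2) ^^^ (gz L1 z1 &&& gx L2 x2)) % 2
      = (popcount ((x1 &&& z2) ^^^ (z1 &&& x2)) % 2) ^^^
          (L1.zip L2).foldl (fun q ab => q ^^^ tbit ab.1 ab.2) 0 := by
  induction L1 generalizing L2 x1 z1 x2 z2 with
  | nil =>
    cases L2 with
    | nil => simp [gx, gz]
    | cons b L2 => simp at h
  | cons a L1 ih =>
    cases L2 with
    | nil => simp at h
    | cons b L2 =>
      have hlen : L1.length = L2.length := by simpa using h
      have e1 : gx (a :: L1) x1 = gx L1 (2 * x1 + bitXY a) := rfl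
      have e2 : gz (a :: L1) z1 = gz L1 (2 * z1 + bitYZ a) := rfl
      have e3 : gx (b :: L2) x2 = gx L2 (2 * x2 + bitXY b) := rfl
      have e4 : gz (b :: L2) z2 = gz L2 (2 * z2 + bitYZ b) := rfl
      rw [e1, e2, e3, e4, ih L2 hlen]
      have hand1 : (2 * x1 + bitXY a) &&& (2 * z2 + bitYZ b)
          = 2 * (x1 &&& z2) + (bitXY a &&& bitYZ b) :=
        and_bit _ _ _ _ (bitXY_lt a) (bitYZ_lt b)
      have hand2 : (2 * z1 + bitYZ a) &&& (2 * x2 + bitXY b)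
          = 2 * (z1 &&& x2) + (bitYZ a &&& bitXY b) :=
        and_bit _ _ _ _ (bitYZ_lt a) (bitXY_lt b)
      have hu : bitXY a &&& bitYZ b < 2 := lt_of_le_of_lt Nat.and_le_left (bitXY_lt a)
      have hv : bitYZ a &&& bitXY b < 2 := lt_of_le_of_lt Nat.and_le_left (bitYZ_lt a)
      rw [hand1, hand2, xor_bit _ _ _ _ hu hv,
          show (bitXY a &&& bitYZ b ^^^ bitYZ a &&& bitXY b) = tbit a b from rfl,
          popcount_bit _ _ (tbit_lt a b), mod_two_xor _ _ (tbit_lt a b),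
          List.zip_cons_cons, List.foldl_cons,
          foldl_xor_start _ (0 ^^^ tbit a b)]
      simp [Nat.xor_assoc]

-- ===== VERDICT (by name: the statement is the Claim_ definition above) =====
theorem anticommutes_spec : Claim_equal_anticommutes := by
  intro P Q _ hpre
  unfold Spec_anticommutes anticommutes anticommutes_alt
  rw [pair_fold_eq, pair_fold_eq]
  simp only
  rw [main_inv P.toList Q.toList hpre 0 0 0 0,
      foldA_eq_xor]
  norm_num [popcount]
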